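-- pv_equiv track=rewrite | github.com/pawandeep2155/video_caption | mdata_create.py | line_to_dict
-- ===== SOURCE A (Python) =====
-- def line_to_dict(line):
--     ldict = {}
--     line_list = line.split()
--     v_id = line_list[0]
--     line_list = line_list[1:]
--
--     # add \n to end of each caption in line
--     for i, content in enumerate(line_list):
--         if i+1 < len(line_list) :
--             if content.isdigit() == False and line_list[i+1].isdigit() == True:
--                 line_list[i] = content + r'\n'
--
--     frame_list = ' '.join(line_list).split(r'\n')
--     frame_list = frame_list[:-1]
--
--     for event in frame_list:
--         event_list = event.split()
--         start = event_list[0]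
--         end = event_list[1]
--         cap = ' '.join(event_list[2:])
--         ldict.update({cap:[start, end]})
--
--     return {v_id:ldict}
-- ===== SOURCE B (Python) =====
-- def line_to_dict(line):
--     tokens = line.split()
--     v_id = tokens[0]
--     rest = tokens[1:]
--     # one pass: cut between tok j and tok j+1 when a non-digit token is followed by a digit token
--     chunks = []
--     cur = []
--     for j, tok in enumerate(rest):
--         cur.append(tok)
--         if j + 1 < len(rest) and not tok.isdigit() and rest[j + 1].isdigit():
--             chunks.append(cur)
--             cur = []
--     chunks.append(cur)
--     ldict = {}
--     for chunk in chunks[:-1]: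
--         ldict[' '.join(chunk[2:])] = [chunk[0], chunk[1]]
--     return {v_id: ldict}
-- ===== Notes on version B (the rewrite author's own statement) =====
-- stated objective: simpler
-- what changed: B partitions the token list directly into event chunks in one pass (cut where a non-digit token is followed by a digit token) instead of A's marker trick of appending a literal backslash-n sentinel to tokens, re-joining everything into one string, re-splitting on the sentinel and re-splitting each piece on whitespace.
-- outside the precondition, e.g. on line_to_dict('1 0 12 a\\nb'): A returns {'1': {'a': ['0', '12']}}, B returns {'1': {}}
import Mathlib
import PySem

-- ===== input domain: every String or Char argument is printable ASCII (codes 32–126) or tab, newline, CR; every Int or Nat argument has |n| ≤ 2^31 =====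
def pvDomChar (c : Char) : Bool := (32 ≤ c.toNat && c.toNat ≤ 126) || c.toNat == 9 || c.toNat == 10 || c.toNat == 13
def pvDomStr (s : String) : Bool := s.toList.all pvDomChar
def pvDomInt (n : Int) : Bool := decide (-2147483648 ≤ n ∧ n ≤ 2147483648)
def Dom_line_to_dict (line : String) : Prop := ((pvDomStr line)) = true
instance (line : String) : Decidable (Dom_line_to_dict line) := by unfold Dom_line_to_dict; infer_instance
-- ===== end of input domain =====

-- B replaces A's sentinel trick (append a literal '\n' marker to tokens, join to one string, split on the
-- marker, re-split each piece) by a single direct partition of the token list into chunks; simpler, same cost.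

-- ===== PORT A =====
def line_to_dict (line : String) : List (String × List (String × List String)) :=
  let lineList0 := PySem.Chars.split₀ line.toList
  let v_id := PySem.List.pyGetD lineList0 0 []          -- line_list[0]; IndexError on the empty line, excluded by Pre_
  let lineList := PySem.List.slice lineList0 (some 1) none
  -- for i, content in enumerate(line_list): append r'\n' to content at non-digit→digit boundaries
  let marked := (PySem.List.enumerate lineList).foldl (fun cur ic =>
      if ic.1 + 1 < PySem.List.len cur then
        if PySem.Chars.strIsdigit ic.2 = false ∧
           PySem.Chars.strIsdigit (PySem.List.pyGetD cur (ic.1 + 1) []) = true then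
          PySem.List.pySetD cur ic.1 (ic.2 ++ ['\\', 'n'])
        else cur
      else cur) lineList
  let frameList0 := PySem.Chars.splitOn (PySem.Chars.join [' '] marked) ['\\', 'n']
  let frameList := PySem.List.slice frameList0 none (some (-1))
  let ldict := frameList.foldl (fun (d : PySem.Dict String (List String)) event =>
      let eventList := PySem.Chars.split₀ event
      let start := PySem.List.pyGetD eventList 0 []     -- event_list[0]/[1]; IndexError excluded by Pre_
      let stop := PySem.List.pyGetD eventList 1 []
      let cap := PySem.Chars.join [' '] (PySem.List.slice eventList (some 2) none)
      PySem.Dict.insert d (String.ofList cap) [String.ofList start, String.ofList stop]) ⟨[]⟩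
  [(String.ofList v_id, ldict.items)]

-- ===== PORT B =====
def line_to_dict_alt (line : String) : List (String × List (String × List String)) :=
  let tokens := PySem.Chars.split₀ line.toList
  let v_id := PySem.List.pyGetD tokens 0 []
  let rest := PySem.List.slice tokens (some 1) none
  let st := (PySem.List.enumerate rest).foldl
      (fun (st : List (List (List Char)) × List (List Char)) jt =>
        let cur := st.2 ++ [jt.2]
        if jt.1 + 1 < PySem.List.len rest ∧ PySem.Chars.strIsdigit jt.2 = false ∧
           PySem.Chars.strIsdigit (PySem.List.pyGetD rest (jt.1 + 1) []) = true then
          (st.1 ++ [cur], [])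
        else (st.1, cur)) ([], [])
  let chunks := st.1 ++ [st.2]
  let ldict := (PySem.List.slice chunks none (some (-1))).foldl
      (fun (d : PySem.Dict String (List String)) chunk =>
        PySem.Dict.insert d
          (String.ofList (PySem.Chars.join [' '] (PySem.List.slice chunk (some 2) none)))
          [String.ofList (PySem.List.pyGetD chunk 0 []), String.ofList (PySem.List.pyGetD chunk 1 [])]) ⟨[]⟩
  [(String.ofList v_id, ldict.items)]

-- ===== PRECONDITION & SPEC =====
-- Pre_ excludes lines where A raises IndexError (the empty line, and lines whose first event chunk has a
-- single token) and lines where a token after the first contains the two-character backslash-n sequence,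
-- on which A's sentinel join/split cuts inside tokens — an artefact of the marker encoding as defensible
-- as B's plain token reading.
def Pre_line_to_dict (line : String) : Prop :=
  let toks := PySem.Chars.split₀ line.toList
  toks ≠ [] ∧
  (∀ t ∈ toks.tail, PySem.Chars.isIn ['\\', 'n'] t = false) ∧
  ¬ (2 ≤ toks.tail.length ∧ PySem.Chars.strIsdigit (toks.tail.getD 0 []) = false ∧
     PySem.Chars.strIsdigit (toks.tail.getD 1 []) = true)
instance (line : String) : Decidable (Pre_line_to_dict line) := by unfold Pre_line_to_dict; infer_instance

def pvWitness_line_to_dict : String := "vid 0 10 a cat sits 12 20 dog runs 30 40 end x"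

def Spec_line_to_dict (line : String) (out : List (String × List (String × List String))) : Prop := out = line_to_dict_alt line
instance (line : String) (out : List (String × List (String × List String))) : Decidable (Spec_line_to_dict line out) := by unfold Spec_line_to_dict; infer_instance

-- ===== CLAIM (what is proved, stated in full; the proofs are below) =====
def Claim_equal_line_to_dict : Prop := ∀ (line : String), Dom_line_to_dict line → Pre_line_to_dict line → Spec_line_to_dict line (line_to_dict line)

-- ===== LEMMAS AND PROOFS =====

-- proof-side helpers (used only by the proofs below)
def pvNL : List Char := ['\\', 'n']

def pvP (x y : Char) : Prop := ¬(x = '\\' ∧ y = 'n')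

def pvConsHead (t : List Char) : List (List (List Char)) → List (List (List Char))
  | [] => [[t]]
  | c :: cs => (t :: c) :: cs

def pvAppHead (cur : List (List Char)) : List (List (List Char)) → List (List (List Char))
  | [] => [cur]
  | c :: cs => (cur ++ c) :: cs

-- the token chunks: cut between t and the next token u when t is not a digit-token and u is
def pvChunks : List (List Char) → List (List (List Char))
  | [] => [[]]
  | t :: r =>
    if PySem.Chars.strIsdigit t = false ∧ PySem.Chars.strIsdigit (r.headD []) = true
    then [t] :: pvChunks r else pvConsHead t (pvChunks r)

-- A's marking pass, structurally
def pvMark : List (List Char) → List (List Char)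
  | [] => []
  | t :: r =>
    (if PySem.Chars.strIsdigit t = false ∧ PySem.Chars.strIsdigit (r.headD []) = true
     then t ++ pvNL else t) :: pvMark r

-- the pieces A's splitOn produces: first chunk joined, later chunks joined with a leading space
def pvPieces : List (List (List Char)) → List (List Char)
  | [] => []
  | c :: cs => List.intercalate [' '] c :: cs.map (fun c => ' ' :: List.intercalate [' '] c)

-- a whitespace-free nonempty token
def pvNS (t : List Char) : Prop := t ≠ [] ∧ ∀ c ∈ t, PySem.Chars.isspace c = false

theorem pvChunks_ne_nil (r : List (List Char)) : pvChunks r ≠ [] := by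
  induction r with
  | nil => simp [pvChunks]
  | cons t r ih =>
    simp only [pvChunks]
    split
    · simp
    · cases h : pvChunks r with
      | nil => simp [pvConsHead]
      | cons c cs => simp [pvConsHead]

theorem pvChunks_head_ne_nil (r : List (List Char)) (hr : r ≠ []) (c : List (List Char))
    (cs : List (List (List Char))) (h : pvChunks r = c :: cs) : c ≠ [] := by
  cases r with
  | nil => exact absurd rfl hr
  | cons t r' =>
    simp only [pvChunks] at h
    split at h
    · obtain ⟨h1, -⟩ := List.cons_eq_cons.1 h
      intro hc; rw [hc] at h1; simp at h1
    · cases h2 : pvChunks r' with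
      | nil => exact absurd h2 (pvChunks_ne_nil r')
      | cons c0 cs0 =>
        rw [h2] at h
        simp only [pvConsHead] at h
        obtain ⟨h1, -⟩ := List.cons_eq_cons.1 h
        intro hc; rw [hc] at h1; simp at h1

theorem pvIntercalate_cons_head (sep x : List Char) (a : Char) (xs : List (List Char)) :
    List.intercalate sep ((a :: x) :: xs) = a :: List.intercalate sep (x :: xs) := by
  cases xs with
  | nil => simp [List.intercalate]
  | cons y ys => simp [List.intercalate]

theorem pvIntercalate_append_head (sep x y : List Char) (xs : List (List Char)) :
    List.intercalate sep ((x ++ y) :: xs) = x ++ List.intercalate sep (y :: xs) := by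
  induction x with
  | nil => simp
  | cons a x' ih => rw [List.cons_append, pvIntercalate_cons_head, ih]; simp

theorem pvMark_ne_nil (r : List (List Char)) (hr : r ≠ []) : pvMark r ≠ [] := by
  cases r with
  | nil => exact absurd rfl hr
  | cons t r' => simp [pvMark]

theorem pvChunks_mem_mem (r : List (List Char)) :
    ∀ c ∈ pvChunks r, ∀ t ∈ c, t ∈ r := by
  induction r with
  | nil => simp [pvChunks]
  | cons u r ih =>
    simp only [pvChunks]
    split
    · intro c hc t ht
      rcases List.mem_cons.1 hc with h | h
      · subst h; simp at ht; simp [ht]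
      · exact List.mem_cons_of_mem _ (ih c h t ht)
    · intro c hc t ht
      cases hch : pvChunks r with
      | nil => rw [hch] at hc; simp [pvConsHead] at hc; subst hc; simp at ht; simp [ht]
      | cons c0 cs =>
        rw [hch] at hc; simp only [pvConsHead] at hc
        rcases List.mem_cons.1 hc with h | h
        · subst h
          rcases List.mem_cons.1 ht with h' | h'
          · simp [h']
          · exact List.mem_cons_of_mem _ (ih c0 (by rw [hch]; exact List.mem_cons_self) t h')
        · exact List.mem_cons_of_mem _ (ih c (by rw [hch]; exact List.mem_cons_of_mem _ h) t ht)

theorem pvGoAcc (sep : List Char) (fuel : Nat) (l cur : List Char) (acc : List (List Char)) :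
    PySem.Chars.splitOn.go sep fuel l cur acc
    = acc.reverse ++ PySem.Chars.splitOn.go sep fuel l cur [] := by
  induction fuel generalizing l cur acc with
  | zero => simp [PySem.Chars.splitOn.go]
  | succ f ih =>
    cases l with
    | nil => simp [PySem.Chars.splitOn.go]
    | cons c rest =>
      simp only [PySem.Chars.splitOn.go]
      split
      · rw [ih _ _ (cur.reverse :: acc), ih _ _ [cur.reverse]]; simp
      · rw [ih _ _ acc]

theorem pvGoNoSep (fuel : Nat) (l cur : List Char) (acc : List (List Char))
    (h : ¬ pvNL <:+: l) :
    PySem.Chars.splitOn.go pvNL fuel l cur acc = ((cur.reverse ++ l) :: acc).reverse := by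
  induction fuel generalizing l cur with
  | zero => simp [PySem.Chars.splitOn.go]
  | succ f ih =>
    cases l with
    | nil => simp [PySem.Chars.splitOn.go]
    | cons c rest =>
      have hpre : pvNL.isPrefixOf (c :: rest) = false := by
        rw [Bool.eq_false_iff]
        intro hb
        exact h ((List.isPrefixOf_iff_prefix.1 hb).isInfix)
      simp only [PySem.Chars.splitOn.go, hpre]
      rw [ih rest (c :: cur) (fun hi => h (List.infix_cons hi))]
      simp

theorem pvGoFuel (sep : List Char) (f₁ f₂ : Nat) (l cur : List Char) (acc : List (List Char))
    (h₁ : l.length < f₁) (h₂ : l.length < f₂) (hsep : sep ≠ []) :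
    PySem.Chars.splitOn.go sep f₁ l cur acc = PySem.Chars.splitOn.go sep f₂ l cur acc := by
  induction f₁ generalizing f₂ l cur acc with
  | zero => omega
  | succ f ih =>
    cases f₂ with
    | zero => omega
    | succ g =>
      cases l with
      | nil => simp [PySem.Chars.splitOn.go]
      | cons c rest =>
        simp only [PySem.Chars.splitOn.go]
        split
        · rename_i hb
          have hlen : sep.length ≠ 0 := by simpa using hsep
          have : (List.drop sep.length (c :: rest)).length < f := by
            simp only [List.length_drop]; simp at h₁ ⊢; omega
          exact ih _ _ _ _ this (by simp only [List.length_drop]; simp at h₂ ⊢; omega)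
        · exact ih _ _ _ _ (by simp at h₁ ⊢; omega) (by simp at h₂ ⊢; omega)

theorem pvGoSep (a : List Char) (ha : ¬ pvNL <:+: a) (b : List Char) (f₁ f₂ : Nat)
    (cur : List Char) (acc : List (List Char))
    (h₁ : (a ++ pvNL ++ b).length < f₁) (h₂ : b.length < f₂) :
    PySem.Chars.splitOn.go pvNL f₁ (a ++ pvNL ++ b) cur acc
    = PySem.Chars.splitOn.go pvNL f₂ b [] ((cur.reverse ++ a) :: acc) := by
  induction a generalizing f₁ cur with
  | nil =>
    cases f₁ with
    | zero => omega
    | succ f =>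
      have : ([] : List Char) ++ pvNL ++ b = '\\' :: 'n' :: b := by simp [pvNL]
      rw [this]
      have hb : pvNL.isPrefixOf ('\\' :: 'n' :: b) = true := by
        apply List.isPrefixOf_iff_prefix.2; exact ⟨b, rfl⟩
      simp only [PySem.Chars.splitOn.go, hb]
      have hdrop : List.drop pvNL.length ('\\' :: 'n' :: b) = b := by simp [pvNL]
      rw [hdrop]
      rw [pvGoFuel pvNL f f₂ b [] _ (by simp [pvNL] at h₁ ⊢; omega) h₂ (by simp [pvNL])]
      simp
  | cons c a' ih =>
    cases f₁ with
    | zero => omega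
    | succ f =>
      have hl : (c :: a') ++ pvNL ++ b = c :: (a' ++ pvNL ++ b) := by simp
      rw [hl]
      have hpre : pvNL.isPrefixOf (c :: (a' ++ pvNL ++ b)) = false := by
        rw [Bool.eq_false_iff]
        intro hb
        have hp := List.isPrefixOf_iff_prefix.1 hb
        cases a' with
        | nil =>
          -- a' = [], so the list is c :: '\' :: 'n' :: b ; prefix forces 'n' = '\'
          simp [pvNL] at hp
        | cons d a'' =>
          simp [pvNL] at hp
          apply ha
          obtain ⟨hc, hd⟩ := hp
          subst hc hd
          exact ⟨[], a'', by simp [pvNL]⟩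
      simp only [PySem.Chars.splitOn.go, hpre]
      rw [ih (fun hi => ha (List.infix_cons hi)) f (c :: cur) (by simp at h₁ ⊢; omega)]
      simp

theorem pvSplitOn_intercalate (ps : List (List Char)) (hne : ps ≠ [])
    (h : ∀ p ∈ ps, ¬ pvNL <:+: p) :
    PySem.Chars.splitOn (List.intercalate pvNL ps) pvNL = ps := by
  induction ps with
  | nil => exact absurd rfl hne
  | cons p qs ih =>
    cases qs with
    | nil =>
      have hint1 : List.intercalate pvNL [p] = p := by simp [List.intercalate]
      rw [hint1]
      unfold PySem.Chars.splitOn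
      rw [pvGoNoSep _ _ _ _ (h p List.mem_cons_self)]
      simp
    | cons q qs' =>
      have hint : List.intercalate pvNL (p :: q :: qs') = p ++ pvNL ++ List.intercalate pvNL (q :: qs') := by
        simp [List.intercalate]
      unfold PySem.Chars.splitOn
      rw [hint]
      rw [pvGoSep p (h p List.mem_cons_self) _ _ ((List.intercalate pvNL (q :: qs')).length + 1) [] []
        (by omega) (by omega)]
      rw [pvGoAcc]
      simp only [List.reverse_cons, List.reverse_nil, List.nil_append]
      have := ih (by simp) (fun t ht => h t (List.mem_cons_of_mem _ ht))
      unfold PySem.Chars.splitOn at this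
      rw [this]
      simp

theorem pvNotInfix_iff_chain (s : List Char) :
    ¬ (pvNL <:+: s) ↔ List.IsChain pvP s := by
  induction s with
  | nil => simp [pvNL]
  | cons c s ih =>
    rw [List.infix_cons_iff]
    constructor
    · intro hn
      rw [List.isChain_cons]
      refine ⟨?_, ih.1 (fun hi => hn (Or.inr hi))⟩
      intro y hy
      rintro ⟨hc, hyn⟩
      apply hn
      left
      subst hc hyn
      cases s with
      | nil => simp at hy
      | cons d s' =>
        simp at hy
        subst hy
        exact ⟨s', by simp [pvNL]⟩
    · intro hch
      rw [List.isChain_cons] at hch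
      rintro (hp | hi)
      · cases s with
        | nil =>
          have := hp.length_le
          simp [pvNL] at this
        | cons d s' =>
          have hp' : ('\\' : Char) = c ∧ ['n'] <+: (d :: s') := by
            have : pvNL = '\\' :: ['n'] := rfl
            rw [this, List.cons_prefix_cons] at hp
            exact hp
          obtain ⟨hc, hn⟩ := hp'
          rw [List.cons_prefix_cons] at hn
          exact (hch.1 d rfl) ⟨hc.symm, hn.1.symm⟩
      · exact (ih.2 hch.2) hi

theorem pvChain_intercalate (ts : List (List Char)) (h : ∀ t ∈ ts, List.IsChain pvP t) :
    List.IsChain pvP (List.intercalate [' '] ts) := by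
  induction ts with
  | nil => simp [List.intercalate]
  | cons t ts' ih =>
    cases ts' with
    | nil =>
      have : List.intercalate [' '] [t] = t := by simp [List.intercalate]
      rw [this]; exact h t List.mem_cons_self
    | cons u ts'' =>
      have : List.intercalate [' '] (t :: u :: ts'') = t ++ [' '] ++ List.intercalate [' '] (u :: ts'') := by
        simp [List.intercalate]
      rw [this]
      rw [List.isChain_append, List.isChain_append]
      refine ⟨⟨h t List.mem_cons_self, by simp, ?_⟩, ih (fun x hx => h x (List.mem_cons_of_mem _ hx)), ?_⟩
      · intro x hx y hy
        simp at hy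
        subst hy
        rintro ⟨-, hn⟩
        exact absurd hn (by decide)
      · intro x hx y hy
        have hx' : x = ' ' := by
          rw [List.getLast?_concat] at hx
          simpa using hx.symm
        subst hx'
        rintro ⟨hc, -⟩
        exact absurd hc (by decide)

-- split₀ mechanics

theorem pvS0Acc (l cur : List Char) (acc : List (List Char)) :
    PySem.Chars.split₀.go l cur acc = acc.reverse ++ PySem.Chars.split₀.go l cur [] := by
  induction l generalizing cur acc with
  | nil =>
    simp only [PySem.Chars.split₀.go]
    split <;> simp
  | cons c rest ih =>
    simp only [PySem.Chars.split₀.go]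
    split
    · split
      · rw [ih [] acc, ih [] []]
      · rw [ih [] (cur.reverse :: acc), ih [] [cur.reverse]]; simp
    · rw [ih (c :: cur) acc]

theorem pvS0Token (t : List Char) (ht : ∀ c ∈ t, PySem.Chars.isspace c = false)
    (l cur : List Char) (acc : List (List Char)) :
    PySem.Chars.split₀.go (t ++ l) cur acc = PySem.Chars.split₀.go l (t.reverse ++ cur) acc := by
  induction t generalizing cur with
  | nil => simp
  | cons c t' ih =>
    have hc : PySem.Chars.isspace c = false := ht c List.mem_cons_self
    simp only [List.cons_append, PySem.Chars.split₀.go, hc]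
    simp only [Bool.false_eq_true, if_false]
    rw [ih (fun d hd => ht d (List.mem_cons_of_mem _ hd)) (c :: cur)]
    simp

theorem pvSplit₀_space (x : List Char) :
    PySem.Chars.split₀ (' ' :: x) = PySem.Chars.split₀ x := by
  have hsp : PySem.Chars.isspace ' ' = true := by decide
  unfold PySem.Chars.split₀
  simp only [PySem.Chars.split₀.go, hsp, if_true]
  simp

theorem pvSplit₀_intercalate (ts : List (List Char)) (h : ∀ t ∈ ts, pvNS t) :
    PySem.Chars.split₀ (List.intercalate [' '] ts) = ts := by
  induction ts with
  | nil => simp [List.intercalate, PySem.Chars.split₀, PySem.Chars.split₀.go]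
  | cons t ts' ih =>
    obtain ⟨htne, htns⟩ := h t List.mem_cons_self
    cases ts' with
    | nil =>
      have h1 : List.intercalate [' '] [t] = t := by simp [List.intercalate]
      rw [h1]
      unfold PySem.Chars.split₀
      rw [show t = t ++ [] by simp, pvS0Token t htns]
      simp only [PySem.Chars.split₀.go]
      have : (t.reverse ++ []).isEmpty = false := by
        simp; exact htne
      simp
      exact htne
    | cons u ts'' =>
      have h1 : List.intercalate [' '] (t :: u :: ts'') = t ++ (' ' :: List.intercalate [' '] (u :: ts'')) := by
        simp [List.intercalate]
      rw [h1]
      unfold PySem.Chars.split₀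
      rw [pvS0Token t htns]
      simp only [PySem.Chars.split₀.go]
      have hsp : PySem.Chars.isspace ' ' = true := by decide
      have hem : (t.reverse ++ []).isEmpty = false := by simp; exact htne
      simp only [hsp, if_true, hem, Bool.false_eq_true, if_false]
      rw [pvS0Acc]
      simp only [List.append_nil, List.reverse_cons, List.reverse_nil, List.nil_append,
        List.reverse_reverse]
      have := ih (fun x hx => h x (List.mem_cons_of_mem _ hx))
      unfold PySem.Chars.split₀ at this
      rw [this]
      simp

theorem pvS0goNS (l : List Char) : ∀ (cur : List Char) (acc : List (List Char)),
    (∀ t ∈ acc, pvNS t) → (∀ c ∈ cur, PySem.Chars.isspace c = false) →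
    ∀ t ∈ PySem.Chars.split₀.go l cur acc, pvNS t := by
  induction l with
  | nil =>
    intro cur acc hacc hcur t ht
    simp only [PySem.Chars.split₀.go] at ht
    split at ht
    · exact hacc t (by simpa using ht)
    · simp at ht
      rcases ht with h | h
      · exact hacc t h
      · subst h
        refine ⟨by simpa [List.isEmpty_iff] using ‹¬cur.isEmpty = true›, ?_⟩
        intro c hc; exact hcur c (by simpa using hc)
  | cons c rest ih =>
    intro cur acc hacc hcur t ht
    simp only [PySem.Chars.split₀.go] at ht
    split at ht
    · split at ht
      · exact ih [] acc hacc (by simp) t ht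
      · refine ih [] (cur.reverse :: acc) ?_ (by simp) t ht
        intro u hu
        rcases List.mem_cons.1 hu with h | h
        · subst h
          refine ⟨by simpa [List.isEmpty_iff] using ‹¬cur.isEmpty = true›, ?_⟩
          intro d hd; exact hcur d (by simpa using hd)
        · exact hacc u h
    · refine ih (c :: cur) acc hacc ?_ t ht
      intro d hd
      rcases List.mem_cons.1 hd with h | h
      · subst h; simp_all
      · exact hcur d h

theorem pvSplit₀_tokens (s : List Char) : ∀ t ∈ PySem.Chars.split₀ s, pvNS t :=
  pvS0goNS s [] [] (by simp) (by simp)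

theorem pvEnumerate_cons {α : Type} (x : α) (xs : List α) (s : Int) :
    PySem.List.enumerate (x :: xs) s = (s, x) :: PySem.List.enumerate xs (s + 1) := by
  simp [PySem.List.enumerate]

theorem pvSetMid (pre suf : List (List Char)) (t v : List Char) :
    PySem.List.pySetD (pre ++ t :: suf) (pre.length : Int) v = pre ++ v :: suf := by
  simp [PySem.List.pySetD, PySem.List.pySet?, PySem.List.pyIdx?]

theorem pvGetMid (pre suf : List (List Char)) (t : List Char) :
    PySem.List.pyGetD (pre ++ t :: suf) ((pre.length : Int) + 1) [] = suf.headD [] := by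
  have h : ((pre.length : Int) + 1) = ((pre.length + 1 : Nat) : Int) := by push_cast; ring
  rw [h, PySem.List.pyGetD_natCast]
  rw [List.getD_eq_getElem?_getD, List.getElem?_append_right (by omega)]
  have : pre.length + 1 - pre.length = 1 := by omega
  rw [this]
  cases suf <;> simp

theorem pvLemA (suf pre : List (List Char)) :
    List.foldl (fun cur ic =>
      if ic.1 + 1 < PySem.List.len cur then
        if PySem.Chars.strIsdigit ic.2 = false ∧
           PySem.Chars.strIsdigit (PySem.List.pyGetD cur (ic.1 + 1) []) = true then
          PySem.List.pySetD cur ic.1 (ic.2 ++ ['\\', 'n'])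
        else cur
      else cur) (pre ++ suf) (PySem.List.enumerate suf (pre.length : Int))
    = pre ++ pvMark suf := by
  induction suf generalizing pre with
  | nil => simp [PySem.List.enumerate, pvMark]
  | cons t suf' ih =>
    rw [pvEnumerate_cons, List.foldl_cons]
    cases suf' with
    | nil =>
      have hc : ¬((pre.length : Int) + 1 < PySem.List.len (pre ++ [t])) := by
        rw [PySem.List.len_eq]; simp
      simp only [hc, if_false]
      simp [PySem.List.enumerate, pvMark, PySem.Chars.strIsdigit]
    | cons u r =>
      have hc : ((pre.length : Int) + 1 < PySem.List.len (pre ++ t :: u :: r)) := by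
        rw [PySem.List.len_eq]; simp
      simp only [hc, if_true]
      rw [pvGetMid]
      simp only [List.headD_cons]
      by_cases hb : PySem.Chars.strIsdigit t = false ∧ PySem.Chars.strIsdigit u = true
      · simp only [hb, and_self, if_true]
        rw [pvSetMid]
        have : pre ++ (t ++ ['\\', 'n']) :: u :: r = (pre ++ [t ++ ['\\', 'n']]) ++ (u :: r) := by simp
        rw [this]
        have hlen : (pre.length : Int) + 1 = (((pre ++ [t ++ ['\\', 'n']]).length : Nat) : Int) := by
          simp
        rw [hlen, ih]
        simp only [pvMark, List.headD_cons, if_pos hb, pvNL]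
        simp
      · simp only [if_neg hb]
        have : pre ++ t :: u :: r = (pre ++ [t]) ++ (u :: r) := by simp
        rw [this]
        have hlen : (pre.length : Int) + 1 = (((pre ++ [t]).length : Nat) : Int) := by
          simp
        rw [hlen, ih]
        simp only [pvMark, List.headD_cons, if_neg hb]
        simp

theorem pvLemB (suf pre : List (List Char)) (acc : List (List (List Char))) (cur : List (List Char)) :
    (let st := List.foldl (fun (st : List (List (List Char)) × List (List Char)) jt =>
        if jt.1 + 1 < PySem.List.len (pre ++ suf) ∧ PySem.Chars.strIsdigit jt.2 = false ∧
           PySem.Chars.strIsdigit (PySem.List.pyGetD (pre ++ suf) (jt.1 + 1) []) = true then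
          (st.1 ++ [st.2 ++ [jt.2]], [])
        else (st.1, st.2 ++ [jt.2])) (acc, cur) (PySem.List.enumerate suf (pre.length : Int));
     st.1 ++ [st.2])
    = acc ++ pvAppHead cur (pvChunks suf) := by
  induction suf generalizing pre acc cur with
  | nil => simp [PySem.List.enumerate, pvChunks, pvAppHead]
  | cons t suf' ih =>
    rw [pvEnumerate_cons, List.foldl_cons]
    cases suf' with
    | nil =>
      have hc : ¬(((pre.length : Int) + 1 < PySem.List.len (pre ++ [t]) ∧
          PySem.Chars.strIsdigit t = false ∧
          PySem.Chars.strIsdigit (PySem.List.pyGetD (pre ++ [t]) ((pre.length : Int) + 1) []) = true)) := by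
        rw [PySem.List.len_eq]; simp
      simp only [hc, if_false]
      simp [PySem.List.enumerate, pvChunks, pvConsHead, pvAppHead, PySem.Chars.strIsdigit]
    | cons u r =>
      have hgm := pvGetMid pre (u :: r) t
      have hlen1 : ((pre.length : Int) + 1 < PySem.List.len (pre ++ t :: u :: r)) := by
        rw [PySem.List.len_eq]; simp
      by_cases hb : PySem.Chars.strIsdigit t = false ∧ PySem.Chars.strIsdigit u = true
      · have hcond : (((pre.length : Int) + 1 < PySem.List.len (pre ++ t :: u :: r) ∧
            PySem.Chars.strIsdigit t = false ∧
            PySem.Chars.strIsdigit (PySem.List.pyGetD (pre ++ t :: u :: r) ((pre.length : Int) + 1) []) = true)) := by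
          rw [hgm]; exact ⟨hlen1, by simpa using hb⟩
        rw [if_pos hcond]
        have hre : pre ++ t :: u :: r = (pre ++ [t]) ++ (u :: r) := by simp
        have hlen : (pre.length : Int) + 1 = (((pre ++ [t]).length : Nat) : Int) := by simp
        rw [hre, hlen, ih]
        have hchne : pvChunks (u :: r) ≠ [] := by
          simp only [pvChunks]
          split
          · simp
          · cases h : pvChunks r <;> simp [pvConsHead]
        have happ : pvAppHead [] (pvChunks (u :: r)) = pvChunks (u :: r) := by
          cases h : pvChunks (u :: r) with
          | nil => exact absurd h hchne
          | cons c cs => simp [pvAppHead]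
        rw [happ]
        have : pvChunks (t :: u :: r) = [t] :: pvChunks (u :: r) := by
          simp only [pvChunks, List.headD_cons]
          rw [if_pos hb]
        rw [this]
        simp [pvAppHead]
      · have hcond : ¬(((pre.length : Int) + 1 < PySem.List.len (pre ++ t :: u :: r) ∧
            PySem.Chars.strIsdigit t = false ∧
            PySem.Chars.strIsdigit (PySem.List.pyGetD (pre ++ t :: u :: r) ((pre.length : Int) + 1) []) = true)) := by
          rw [hgm]; simp only [List.headD_cons]; intro hx; exact hb ⟨hx.2.1, hx.2.2⟩
        rw [if_neg hcond]
        have hre : pre ++ t :: u :: r = (pre ++ [t]) ++ (u :: r) := by simp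
        have hlen : (pre.length : Int) + 1 = (((pre ++ [t]).length : Nat) : Int) := by simp
        rw [hre, hlen, ih]
        have : pvChunks (t :: u :: r) = pvConsHead t (pvChunks (u :: r)) := by
          simp only [pvChunks, List.headD_cons]
          rw [if_neg hb]
        rw [this]
        cases h : pvChunks (u :: r) with
        | nil =>
          exfalso
          revert h
          simp only [pvChunks]
          split
          · simp
          · cases h2 : pvChunks r <;> simp [pvConsHead]
        | cons c cs => simp [pvAppHead, pvConsHead]

theorem pvLemB0 (r : List (List Char)) :
    (List.foldl (fun (st : List (List (List Char)) × List (List Char)) jt =>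
        if jt.1 + 1 < PySem.List.len r ∧ PySem.Chars.strIsdigit jt.2 = false ∧
           PySem.Chars.strIsdigit (PySem.List.pyGetD r (jt.1 + 1) []) = true then
          (st.1 ++ [st.2 ++ [jt.2]], [])
        else (st.1, st.2 ++ [jt.2])) ([], [])
        (PySem.List.enumerate r ((([] : List (List Char)).length : Nat) : Int))).1
      ++ [(List.foldl (fun (st : List (List (List Char)) × List (List Char)) jt =>
        if jt.1 + 1 < PySem.List.len r ∧ PySem.Chars.strIsdigit jt.2 = false ∧
           PySem.Chars.strIsdigit (PySem.List.pyGetD r (jt.1 + 1) []) = true then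
          (st.1 ++ [st.2 ++ [jt.2]], [])
        else (st.1, st.2 ++ [jt.2])) ([], [])
        (PySem.List.enumerate r ((([] : List (List Char)).length : Nat) : Int))).2]
    = pvAppHead [] (pvChunks r) := pvLemB r [] [] []

theorem pvFoldBody (l : List (List Char)) (d : PySem.Dict String (List String)) :
    List.foldl (fun d event =>
      PySem.Dict.insert d
        (String.ofList (PySem.Chars.join [' '] (PySem.List.slice (PySem.Chars.split₀ event) (some 2) none)))
        [String.ofList (PySem.List.pyGetD (PySem.Chars.split₀ event) 0 []),
         String.ofList (PySem.List.pyGetD (PySem.Chars.split₀ event) 1 [])]) d l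
    = List.foldl (fun d chunk =>
      PySem.Dict.insert d
        (String.ofList (PySem.Chars.join [' '] (PySem.List.slice chunk (some 2) none)))
        [String.ofList (PySem.List.pyGetD chunk 0 []),
         String.ofList (PySem.List.pyGetD chunk 1 [])]) d (l.map PySem.Chars.split₀) :=
  (List.foldl_map (f := PySem.Chars.split₀)
    (g := fun d chunk =>
      PySem.Dict.insert d
        (String.ofList (PySem.Chars.join [' '] (PySem.List.slice chunk (some 2) none)))
        [String.ofList (PySem.List.pyGetD chunk 0 []),
         String.ofList (PySem.List.pyGetD chunk 1 [])]) (l := l) (init := d)).symm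

theorem pvJoinEq (r : List (List Char)) :
    PySem.Chars.join [' '] (pvMark r) = List.intercalate pvNL (pvPieces (pvChunks r)) := by
  simp only [PySem.Chars.join]
  induction r with
  | nil => simp [pvMark, pvChunks, pvPieces, List.intercalate]
  | cons t r' ih =>
    by_cases hb : PySem.Chars.strIsdigit t = false ∧ PySem.Chars.strIsdigit (r'.headD []) = true
    · -- boundary after t; r' ≠ [] since strIsdigit [] = false
      have hr' : r' ≠ [] := by
        intro h; rw [h] at hb; simp [PySem.Chars.strIsdigit] at hb
      have hm : pvMark (t :: r') = (t ++ pvNL) :: pvMark r' := by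
        simp only [pvMark, if_pos hb]
      have hc : pvChunks (t :: r') = [t] :: pvChunks r' := by
        simp only [pvChunks, if_pos hb]
      rw [hm, hc]
      obtain ⟨c, cs, hcs⟩ : ∃ c cs, pvChunks r' = c :: cs := by
        cases h : pvChunks r' with
        | nil => exact absurd h (pvChunks_ne_nil r')
        | cons c cs => exact ⟨c, cs, rfl⟩
      have hmne : pvMark r' ≠ [] := pvMark_ne_nil r' hr'
      obtain ⟨m, ms, hms⟩ : ∃ m ms, pvMark r' = m :: ms := by
        cases h : pvMark r' with
        | nil => exact absurd h hmne
        | cons m ms => exact ⟨m, ms, rfl⟩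
      rw [hms]
      have hL : List.intercalate [' '] ((t ++ pvNL) :: m :: ms)
          = (t ++ pvNL) ++ [' '] ++ List.intercalate [' '] (m :: ms) := by
        simp [List.intercalate]
      rw [hL]
      rw [hcs]
      have hp : pvPieces ([t] :: c :: cs)
          = List.intercalate [' '] [t] :: (' ' :: List.intercalate [' '] c)
            :: cs.map (fun c => ' ' :: List.intercalate [' '] c) := by
        simp [pvPieces]
      rw [hp]
      have h1 : List.intercalate [' '] [t] = t := by simp [List.intercalate]
      rw [h1]
      have h2 : List.intercalate pvNL (t :: (' ' :: List.intercalate [' '] c)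
            :: cs.map (fun c => ' ' :: List.intercalate [' '] c))
          = t ++ pvNL ++ List.intercalate pvNL ((' ' :: List.intercalate [' '] c)
            :: cs.map (fun c => ' ' :: List.intercalate [' '] c)) := by
        simp [List.intercalate]
      rw [h2, pvIntercalate_cons_head]
      have h3 : List.intercalate [' '] c :: cs.map (fun c => ' ' :: List.intercalate [' '] c)
          = pvPieces (c :: cs) := by simp [pvPieces]
      rw [h3, ← hcs, ← ih, hms]
      simp
    · have hm : pvMark (t :: r') = t :: pvMark r' := by
        simp only [pvMark, if_neg hb]
      have hc : pvChunks (t :: r') = pvConsHead t (pvChunks r') := by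
        simp only [pvChunks, if_neg hb]
      rw [hm, hc]
      cases hr' : r' with
      | nil =>
        subst hr'
        simp [pvMark, pvChunks, pvConsHead, pvPieces, List.intercalate]
      | cons u r'' =>
        rw [← hr']
        have hr'ne : r' ≠ [] := by rw [hr']; simp
        obtain ⟨c, cs, hcs⟩ : ∃ c cs, pvChunks r' = c :: cs := by
          cases h : pvChunks r' with
          | nil => exact absurd h (pvChunks_ne_nil r')
          | cons c cs => exact ⟨c, cs, rfl⟩
        have hcne : c ≠ [] := pvChunks_head_ne_nil r' hr'ne c cs hcs
        rw [hcs]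
        simp only [pvConsHead]
        obtain ⟨m, ms, hms⟩ : ∃ m ms, pvMark r' = m :: ms := by
          cases h : pvMark r' with
          | nil => exact absurd h (pvMark_ne_nil r' hr'ne)
          | cons m ms => exact ⟨m, ms, rfl⟩
        rw [hms]
        have hL : List.intercalate [' '] (t :: m :: ms)
            = t ++ [' '] ++ List.intercalate [' '] (m :: ms) := by
          simp [List.intercalate]
        rw [hL]
        have hp : pvPieces ((t :: c) :: cs)
            = List.intercalate [' '] (t :: c) :: cs.map (fun c => ' ' :: List.intercalate [' '] c) := by
          simp [pvPieces]
        rw [hp]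
        obtain ⟨d, c', hdc⟩ : ∃ d c', c = d :: c' := by
          cases c with
          | nil => exact absurd rfl hcne
          | cons d c' => exact ⟨d, c', rfl⟩
        have hJ : List.intercalate [' '] (t :: c) = t ++ [' '] ++ List.intercalate [' '] c := by
          rw [hdc]; simp [List.intercalate]
        rw [hJ, List.append_assoc, pvIntercalate_append_head]
        have h3 : List.intercalate [' '] c :: cs.map (fun c => ' ' :: List.intercalate [' '] c)
            = pvPieces (c :: cs) := by simp [pvPieces]
        rw [h3, ← hcs, ← ih, hms]
        simp

theorem pvMapSplitPieces (cs : List (List (List Char))) (h : ∀ c ∈ cs, ∀ t ∈ c, pvNS t) :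
    (pvPieces cs).map PySem.Chars.split₀ = cs := by
  cases cs with
  | nil => simp [pvPieces]
  | cons c cs' =>
    simp only [pvPieces, List.map_cons, List.map_map]
    rw [pvSplit₀_intercalate c (h c List.mem_cons_self)]
    congr 1
    rw [show (PySem.Chars.split₀ ∘ fun c => ' ' :: List.intercalate [' '] c)
        = fun c => PySem.Chars.split₀ (' ' :: List.intercalate [' '] c) from rfl]
    have : ∀ x ∈ cs', PySem.Chars.split₀ (' ' :: List.intercalate [' '] x) = x := by
      intro x hx
      rw [pvSplit₀_space, pvSplit₀_intercalate x (h x (List.mem_cons_of_mem _ hx))]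
    calc cs'.map (fun c => PySem.Chars.split₀ (' ' :: List.intercalate [' '] c))
        = cs'.map id := List.map_congr_left this
      _ = cs' := by simp

theorem pvPiecesNoNL (cs : List (List (List Char))) (h : ∀ c ∈ cs, ∀ t ∈ c, ¬ pvNL <:+: t) :
    ∀ p ∈ pvPieces cs, ¬ pvNL <:+: p := by
  cases cs with
  | nil => simp [pvPieces]
  | cons c cs' =>
    intro p hp
    simp only [pvPieces, List.mem_cons, List.mem_map] at hp
    rcases hp with hp | ⟨x, hx, hp⟩
    · subst hp
      rw [pvNotInfix_iff_chain]
      exact pvChain_intercalate c (fun t ht =>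
        (pvNotInfix_iff_chain t).1 (h c List.mem_cons_self t ht))
    · subst hp
      rw [pvNotInfix_iff_chain, List.isChain_cons]
      constructor
      · intro y hy
        rintro ⟨hc, -⟩
        exact absurd hc (by decide)
      · exact pvChain_intercalate x (fun t ht =>
          (pvNotInfix_iff_chain t).1 (h x (List.mem_cons_of_mem _ hx) t ht))

theorem pvFrameEq (r : List (List Char)) (hnl : ∀ t ∈ r, ¬ pvNL <:+: t) (hns : ∀ t ∈ r, pvNS t) :
    (PySem.Chars.splitOn (PySem.Chars.join [' '] (pvMark r)) ['\\', 'n']).map PySem.Chars.split₀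
    = pvChunks r := by
  have hnlc : (['\\', 'n'] : List Char) = pvNL := rfl
  rw [hnlc, pvJoinEq]
  rw [pvSplitOn_intercalate (pvPieces (pvChunks r)) ?hne ?hfree]
  · exact pvMapSplitPieces (pvChunks r)
      (fun c hc t ht => hns t (pvChunks_mem_mem r c hc t ht))
  case hne =>
    cases h : pvChunks r with
    | nil => exact absurd h (pvChunks_ne_nil r)
    | cons c cs => simp [pvPieces]
  case hfree =>
    exact pvPiecesNoNL (pvChunks r)
      (fun c hc t ht => hnl t (pvChunks_mem_mem r c hc t ht))

-- ===== VERDICT (by name: the statement is the Claim_ definition above) =====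
theorem line_to_dict_spec : Claim_equal_line_to_dict := by
  intro line hdom hpre
  simp only [Spec_line_to_dict, line_to_dict, line_to_dict_alt]
  unfold Pre_line_to_dict at hpre
  obtain ⟨hne, hnl, -⟩ := hpre
  have htail : PySem.List.slice (PySem.Chars.split₀ line.toList) (some 1) none
      = (PySem.Chars.split₀ line.toList).tail := by
    rw [PySem.List.slice_from _ (by norm_num)]
    simp [List.drop_one]
  rw [htail]
  set L0 := PySem.Chars.split₀ line.toList with hL0
  set r := L0.tail with hr
  -- align the default enumerate start with the lemma instantiation (pre = [])
  rw [show PySem.List.enumerate r = PySem.List.enumerate r ((([] : List (List Char)).length : Nat) : Int) from rfl]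
  -- A's marking loop
  have hA := pvLemA r []
  rw [List.nil_append] at hA
  rw [hA]
  -- B's chunking loop
  rw [pvLemB0 r]
  have happB : pvAppHead [] (pvChunks r) = pvChunks r := by
    cases h : pvChunks r with
    | nil => exact absurd h (pvChunks_ne_nil r)
    | cons c cs => simp [pvAppHead]
  rw [List.nil_append, happB]
  -- frame list = pieces; both folds over dropLast (pvChunks r)
  have hns : ∀ t ∈ r, pvNS t := fun t ht =>
    pvSplit₀_tokens line.toList t (List.mem_of_mem_tail ht)
  have hnlr : ∀ t ∈ r, ¬ pvNL <:+: t := by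
    intro t ht
    have := hnl t ht
    rw [PySem.Chars.isIn_eq_false_iff] at this
    exact this
  have hframe := pvFrameEq r hnlr hns
  rw [PySem.List.slice_to_neg_one, PySem.List.slice_to_neg_one]
  congr 1
  rw [pvFoldBody, List.map_dropLast, hframe]
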